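-- pv_equiv track=rewrite | github.com/linhdvu14/cp-sols | sols/CodeForces/1592_d2/F1_Alice_and_Recoloring_1.py | solve
-- ===== SOURCE A (Python) =====
-- def solve(R, C, grid):
--     # convert B->1, W->0
--     # want grid to be all 0
--     grid = [[1 if v=='B' else 0 for v in row] for row in grid]
--
--     # convert grid[r][c] = (grid[r][c] + grid[r+1][c] + grid[r][c+1] + grid[r+1][c+1]) % 2
--     # want grid to be all 0
--     ngrid = [[0]*C for _ in range(R)]
--     for r in range(R):
--         for c in range(C):
--             s = grid[r][c]
--             if r+1 < R: s += grid[r+1][c]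
--             if c+1 < C: s += grid[r][c+1]
--             if r+1 < R and c+1 < C: s += grid[r+1][c+1]
--             ngrid[r][c] = s % 2
--     grid = ngrid
--
--     # each (0, 0) op change 1 cell
--     # each (R-1, C-1) op change 3 cells: (r, c), (r, C-1), (R-1, c), (R-1, C-1)
--     # should call (R-1, C-1) op at most once, and only when 4 corners are all 1
--     res = sum(sum(row) for row in grid)
--     if grid[R-1][C-1] == 1:
--         for r in range(R-1):
--             for c in range(C-1):
--                 if grid[r][c] == grid[r][C-1] == grid[R-1][c] == 1:
--                     return res - 1
--     return res
-- ===== SOURCE B (Python) =====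
-- def solve(R, C, grid):
--     # 2D prefix-parity table X ((R+1) x (C+1)): X[i][j] = parity of the count of
--     # 'B' cells in the top-left i x j sub-rectangle.  Each transformed cell is
--     # then four clamped table lookups (inclusion-exclusion mod 2); the corner
--     # reduction materialises the transformed last column and uses marker
--     # index sets + membership instead of a triple-equality nested scan.
--     X = [[0] * (C + 1)]
--     for r in range(R):
--         row = grid[r]
--         prev = X[-1]
--         cur = [0]
--         for c in range(C):
--             b = 1 if row[c] == 'B' else 0
--             cur.append((prev[c + 1] + cur[c] + prev[c] + b) % 2)
--         X.append(cur)
--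
--     def t(r, c):
--         r2 = min(r + 2, R)
--         c2 = min(c + 2, C)
--         return (X[r2][c2] + X[r][c2] + X[r2][c] + X[r][c]) % 2
--
--     res = sum(t(r, c) for r in range(R) for c in range(C))
--     right_col = [t(r, C - 1) for r in range(R)]
--     if right_col[R - 1] == 1:
--         marked_rows = {r for r in range(R - 1) if right_col[r] == 1}
--         marked_cols = {c for c in range(C - 1) if t(R - 1, c) == 1}
--         if any(r in marked_rows and c in marked_cols
--                for r in range(R - 1) for c in range(C - 1) if t(r, c) == 1):
--             res -= 1
--     return res
-- ===== Notes on version B (the rewrite author's own statement) =====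
-- stated objective: alternative
-- what changed: B replaces A's per-cell 2x2 neighbour-sum transform by a 2D prefix-parity table built once in a single sweep, recovers each transformed cell by inclusion-exclusion from four clamped table lookups, and replaces A's triple-equality nested corner scan by marker-row/marker-column index sets tested by membership.
import Mathlib
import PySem

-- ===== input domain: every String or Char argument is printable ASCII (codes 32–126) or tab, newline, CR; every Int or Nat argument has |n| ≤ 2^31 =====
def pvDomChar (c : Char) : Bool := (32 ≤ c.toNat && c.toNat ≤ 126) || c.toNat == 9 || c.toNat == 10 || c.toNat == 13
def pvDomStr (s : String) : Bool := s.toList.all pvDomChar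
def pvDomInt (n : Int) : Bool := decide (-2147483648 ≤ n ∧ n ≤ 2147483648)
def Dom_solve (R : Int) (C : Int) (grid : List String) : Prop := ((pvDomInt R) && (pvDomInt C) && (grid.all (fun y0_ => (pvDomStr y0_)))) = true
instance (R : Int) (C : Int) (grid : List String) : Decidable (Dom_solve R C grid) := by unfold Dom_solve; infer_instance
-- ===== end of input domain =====

-- B replaces the per-cell 2x2 neighbour sum by a 2D prefix-parity table (four clamped
-- lookups per cell) and the triple-equality corner scan by marker index sets
-- (objective: alternative, same asymptotic cost).

-- ===== PORT A =====

-- loop body of A's transform: s = grid[r][c] (+ neighbours) ; s % 2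
def pvCell (R : Int) (C : Int) (b : List (List Int)) (r : Int) (c : Int) : Int :=
  let s := PySem.List.pyGetD (PySem.List.pyGetD b r []) c 0
  let s := if r + 1 < R then s + PySem.List.pyGetD (PySem.List.pyGetD b (r + 1) []) c 0 else s
  let s := if c + 1 < C then s + PySem.List.pyGetD (PySem.List.pyGetD b r []) (c + 1) 0 else s
  let s := if r + 1 < R ∧ c + 1 < C then s + PySem.List.pyGetD (PySem.List.pyGetD b (r + 1) []) (c + 1) 0 else s
  PySem.Int.mod s 2

def solve (R : Int) (C : Int) (grid : List String) : Int :=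
  let b := grid.map (fun row => row.toList.map (fun v => if v == 'B' then (1 : Int) else 0))
  let ng := (PySem.List.pyRange 0 R 1).map (fun r =>
              (PySem.List.pyRange 0 C 1).map (fun c => pvCell R C b r c))
  let g := fun (r c : Int) => PySem.List.pyGetD (PySem.List.pyGetD ng r ([] : List Int)) c 0
  let res := (ng.map (fun row => row.sum)).sum
  if g (R - 1) (C - 1) == 1 then
    if (PySem.List.pyRange 0 (R - 1) 1).any (fun r =>
         (PySem.List.pyRange 0 (C - 1) 1).any (fun c =>
           g r c == g r (C - 1) && g r (C - 1) == g (R - 1) c && g (R - 1) c == 1))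
    then res - 1 else res
  else res

-- ===== PORT B =====

-- body of B's inner loop: cur.append((prev[c+1] + cur[c] + prev[c] + b) % 2)
def pvStep (rowChars : List Char) (prev : List Int) (cur : List Int) (c : Int) : List Int :=
  let b : Int := if PySem.List.pyGetD rowChars c ' ' == 'B' then 1 else 0
  cur ++ [PySem.Int.mod (PySem.List.pyGetD prev (c + 1) 0 + PySem.List.pyGetD cur c 0 +
                         PySem.List.pyGetD prev c 0 + b) 2]

-- one new prefix-parity row from the previous one
def pvNextRow (C : Int) (row : String) (prev : List Int) : List Int :=
  (PySem.List.pyRange 0 C 1).foldl (pvStep row.toList prev) [0]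

-- the full (R+1) x (C+1) prefix-parity table X
def pvBuildX (R : Int) (C : Int) (grid : List String) : List (List Int) :=
  (PySem.List.pyRange 0 R 1).foldl
    (fun X r => X ++ [pvNextRow C (PySem.List.pyGetD grid r "") (PySem.List.pyGetD X (-1) [])])
    [List.replicate (C + 1).toNat 0]

-- t(r, c): inclusion-exclusion mod 2 from four clamped lookups into X
def pvTB (R : Int) (C : Int) (X : List (List Int)) (r : Int) (c : Int) : Int :=
  let r2 := min (r + 2) R
  let c2 := min (c + 2) C
  let g := fun (i j : Int) => PySem.List.pyGetD (PySem.List.pyGetD X i ([] : List Int)) j 0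
  PySem.Int.mod (g r2 c2 + g r c2 + g r2 c + g r c) 2

def solve_alt (R : Int) (C : Int) (grid : List String) : Int :=
  let X := pvBuildX R C grid
  let res := ((PySem.List.pyRange 0 R 1).flatMap (fun r =>
                (PySem.List.pyRange 0 C 1).map (fun c => pvTB R C X r c))).sum
  let rightCol := (PySem.List.pyRange 0 R 1).map (fun r => pvTB R C X r (C - 1))
  if PySem.List.pyGetD rightCol (R - 1) 0 == 1 then
    let mrows : PySem.Set Int := PySem.Set.ofList
      ((PySem.List.pyRange 0 (R - 1) 1).filter (fun r => PySem.List.pyGetD rightCol r 0 == 1))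
    let mcols : PySem.Set Int := PySem.Set.ofList
      ((PySem.List.pyRange 0 (C - 1) 1).filter (fun c => pvTB R C X (R - 1) c == 1))
    if (PySem.List.pyRange 0 (R - 1) 1).any (fun r =>
         ((PySem.List.pyRange 0 (C - 1) 1).filter (fun c => pvTB R C X r c == 1)).any (fun c =>
           PySem.Set.contains mrows r && PySem.Set.contains mcols c))
    then res - 1 else res
  else res

-- ===== PRECONDITION & SPEC =====
-- Pre_solve is exactly the set of inputs on which the Python A returns
-- (otherwise it raises IndexError reading grid[r][c] / grid[R-1][C-1]).
def Pre_solve (R : Int) (C : Int) (grid : List String) : Prop :=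
  1 ≤ R ∧ 1 ≤ C ∧ R ≤ (grid.length : Int) ∧
  ∀ s ∈ grid.take R.toNat, C ≤ (s.toList.length : Int)

instance (R : Int) (C : Int) (grid : List String) : Decidable (Pre_solve R C grid) := by
  unfold Pre_solve; infer_instance

def pvWitness_solve : Int × Int × List String := (2, 2, ["BW", "WB"])

def Spec_solve (R : Int) (C : Int) (grid : List String) (out : Int) : Prop := out = solve_alt R C grid
instance (R : Int) (C : Int) (grid : List String) (out : Int) : Decidable (Spec_solve R C grid out) := by unfold Spec_solve; infer_instance

-- ===== CLAIM (what is proved, stated in full; the proofs are below) =====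
def Claim_equal_solve : Prop := ∀ (R : Int) (C : Int) (grid : List String), Dom_solve R C grid → Pre_solve R C grid → Spec_solve R C grid (solve R C grid)

-- ===== LEMMAS AND PROOFS =====

-- proof-only: the bit of cell (i, j) and prefix sums of bits
def pvBit (grid : List String) (i : Nat) (j : Nat) : Int :=
  if ((grid.getD i "").toList.getD j ' ') == 'B' then 1 else 0

def pvRowS (grid : List String) (i : Nat) : Nat → Int
  | 0 => 0
  | c + 1 => pvRowS grid i c + pvBit grid i c

def pvS (grid : List String) : Nat → Nat → Int
  | 0, _ => 0
  | i + 1, c => pvS grid i c + pvRowS grid i c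

theorem pvS_zero (grid : List String) (i : Nat) : pvS grid i 0 = 0 := by
  induction i with
  | zero => rfl
  | succ i ih => simp [pvS, pvRowS, ih]

theorem pv_mod2 (a : Int) : PySem.Int.mod a 2 = a % 2 :=
  PySem.Int.mod_eq_emod_of_pos (by norm_num)

-- the inner loop of B builds exactly the next prefix-parity row
theorem pvNextRow_spec (C : Int) (hC : 0 ≤ C) (grid : List String) (i : Nat) :
    pvNextRow C (grid.getD i "") ((List.range (C.toNat + 1)).map (fun j => pvS grid i j % 2))
      = (List.range (C.toNat + 1)).map (fun j => pvS grid (i + 1) j % 2) := by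
  unfold pvNextRow
  have aux : ∀ k : Nat, k ≤ C.toNat →
      (PySem.List.pyRange 0 (k : Int) 1).foldl
        (pvStep (grid.getD i "").toList ((List.range (C.toNat + 1)).map (fun j => pvS grid i j % 2))) [0]
      = (List.range (k + 1)).map (fun j => pvS grid (i + 1) j % 2) := by
    intro k
    induction k with
    | zero =>
      intro _
      simp [PySem.List.pyRange_one_eq_nil (le_refl (0 : Int)), List.range_succ, pvS_zero]
    | succ k ih =>
      intro hk
      have h1 : ((k : Int) + 1) = ((k + 1 : Nat) : Int) := by push_cast; ring
      have h2 : PySem.List.pyRange 0 ((k : Int) + 1) 1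
          = PySem.List.pyRange 0 (k : Int) 1 ++ [(k : Int)] :=
        PySem.List.pyRange_one_succ_right (by positivity)
      rw [← h1, h2, List.foldl_append, ih (by omega)]
      simp only [List.foldl_cons, List.foldl_nil]
      unfold pvStep
      have e1 : PySem.List.pyGetD ((List.range (C.toNat + 1)).map (fun j => pvS grid i j % 2)) ((k : Int) + 1) 0
          = pvS grid i (k + 1) % 2 := by
        rw [h1, PySem.List.pyGetD_natCast, PySem.List.getD_map_range _ _ _ _ (by omega)]
      have e2 : PySem.List.pyGetD ((List.range (k + 1)).map (fun j => pvS grid (i + 1) j % 2)) (k : Int) 0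
          = pvS grid (i + 1) k % 2 := by
        rw [PySem.List.pyGetD_natCast, PySem.List.getD_map_range _ _ _ _ (by omega)]
      have e3 : PySem.List.pyGetD ((List.range (C.toNat + 1)).map (fun j => pvS grid i j % 2)) (k : Int) 0
          = pvS grid i k % 2 := by
        rw [PySem.List.pyGetD_natCast, PySem.List.getD_map_range _ _ _ _ (by omega)]
      have e4 : (if PySem.List.pyGetD (grid.getD i "").toList (k : Int) ' ' == 'B' then (1 : Int) else 0)
          = pvBit grid i k := by
        rw [PySem.List.pyGetD_natCast]; rfl
      simp only [e1, e2, e3, e4, pv_mod2]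
      have hSr : pvRowS grid i (k + 1) = pvRowS grid i k + pvBit grid i k := rfl
      have hS1 : pvS grid (i + 1) (k + 1) = pvS grid i (k + 1) + pvRowS grid i (k + 1) := rfl
      have hS2 : pvS grid (i + 1) k = pvS grid i k + pvRowS grid i k := rfl
      have harith : (pvS grid i (k + 1) % 2 + pvS grid (i + 1) k % 2 + pvS grid i k % 2 + pvBit grid i k) % 2
          = pvS grid (i + 1) (k + 1) % 2 := by omega
      rw [harith]
      simp [List.range_succ]
  have := aux C.toNat (le_refl _)
  rwa [Int.toNat_of_nonneg hC] at this

-- the outer loop of B builds exactly the full prefix-parity table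
theorem pvBuildX_spec (R : Int) (C : Int) (grid : List String) (hR : 0 ≤ R) (hC : 0 ≤ C) :
    pvBuildX R C grid
      = (List.range (R.toNat + 1)).map (fun i =>
          (List.range (C.toNat + 1)).map (fun j => pvS grid i j % 2)) := by
  unfold pvBuildX
  have aux : ∀ k : Nat, k ≤ R.toNat →
      (PySem.List.pyRange 0 (k : Int) 1).foldl
        (fun X r => X ++ [pvNextRow C (PySem.List.pyGetD grid r "") (PySem.List.pyGetD X (-1) [])])
        [List.replicate (C + 1).toNat 0]
      = (List.range (k + 1)).map (fun i =>
          (List.range (C.toNat + 1)).map (fun j => pvS grid i j % 2)) := by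
    intro k
    induction k with
    | zero =>
      intro _
      have hrep : List.replicate (C + 1).toNat (0 : Int)
          = (List.range (C.toNat + 1)).map (fun j => pvS grid 0 j % 2) := by
        have : (C + 1).toNat = C.toNat + 1 := by omega
        rw [this]
        simp [pvS]
      simp [PySem.List.pyRange_one_eq_nil (le_refl (0 : Int)), List.range_succ, hrep]
    | succ k ih =>
      intro hk
      have h1 : ((k : Int) + 1) = ((k + 1 : Nat) : Int) := by push_cast; ring
      have h2 : PySem.List.pyRange 0 ((k : Int) + 1) 1
          = PySem.List.pyRange 0 (k : Int) 1 ++ [(k : Int)] :=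
        PySem.List.pyRange_one_succ_right (by positivity)
      rw [← h1, h2, List.foldl_append, ih (by omega)]
      simp only [List.foldl_cons, List.foldl_nil]
      have hlast : PySem.List.pyGetD
          ((List.range (k + 1)).map (fun i => (List.range (C.toNat + 1)).map (fun j => pvS grid i j % 2))) (-1) []
          = (List.range (C.toNat + 1)).map (fun j => pvS grid k j % 2) := by
        rw [List.range_succ (n := k), List.map_append]
        exact PySem.List.pyGetD_neg_one_append_singleton _ _ _
      have hrow : PySem.List.pyGetD grid (k : Int) "" = grid.getD k "" :=
        PySem.List.pyGetD_natCast _ _ _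
      rw [hlast, hrow, pvNextRow_spec C hC grid k, List.range_succ (n := k + 1), List.map_append]
      simp
  have := aux R.toNat (le_refl _)
  rwa [Int.toNat_of_nonneg hR] at this

-- reading the table at in-range Int indices
theorem pvX_get (R : Int) (C : Int) (grid : List String) (hR : 0 ≤ R) (hC : 0 ≤ C)
    (i j : Int) (hi0 : 0 ≤ i) (hiR : i ≤ R) (hj0 : 0 ≤ j) (hjC : j ≤ C) :
    PySem.List.pyGetD (PySem.List.pyGetD (pvBuildX R C grid) i ([] : List Int)) j 0
      = pvS grid i.toNat j.toNat % 2 := by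
  obtain ⟨i', rfl⟩ : ∃ n : Nat, i = (n : Int) := ⟨i.toNat, by omega⟩
  obtain ⟨j', rfl⟩ : ∃ n : Nat, j = (n : Int) := ⟨j.toNat, by omega⟩
  rw [pvBuildX_spec R C grid hR hC]
  simp only [PySem.List.pyGetD_natCast]
  rw [PySem.List.getD_map_range _ _ _ _ (by omega), PySem.List.getD_map_range _ _ _ _ (by omega)]
  simp

-- A's bit-grid reads are pvBit at in-range indices (needs Pre_: rows long enough)
theorem pv_bread (R : Int) (C : Int) (grid : List String)
    (hlen : R ≤ (grid.length : Int)) (hrows : ∀ s ∈ grid.take R.toNat, C ≤ (s.toList.length : Int))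
    (i j : Int) (hi0 : 0 ≤ i) (hiR : i < R) (hj0 : 0 ≤ j) (hjC : j < C) :
    PySem.List.pyGetD (PySem.List.pyGetD
        (grid.map (fun row => row.toList.map (fun v => if v == 'B' then (1 : Int) else 0))) i []) j 0
      = pvBit grid i.toNat j.toNat := by
  obtain ⟨i', rfl⟩ : ∃ n : Nat, i = (n : Int) := ⟨i.toNat, by omega⟩
  obtain ⟨j', rfl⟩ : ∃ n : Nat, j = (n : Int) := ⟨j.toNat, by omega⟩
  have hi : i' < grid.length := by omega
  have hrl : C ≤ ((grid[i']'hi).toList.length : Int) := by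
    refine hrows _ ?_
    rw [List.mem_take_iff_getElem]
    exact ⟨i', by omega, by simp⟩
  have hj : j' < (grid[i']'hi).toList.length := by omega
  have houter : PySem.List.pyGetD
      (grid.map (fun row => row.toList.map (fun v => if v == 'B' then (1 : Int) else 0))) (i' : Int) []
      = (grid[i']'hi).toList.map (fun v => if v == 'B' then (1 : Int) else 0) := by
    rw [PySem.List.pyGetD_natCast, List.getD_eq_getElem _ _ (by simpa using hi)]
    simp
  have hinner : PySem.List.pyGetD
      ((grid[i']'hi).toList.map (fun v => if v == 'B' then (1 : Int) else 0)) (j' : Int) 0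
      = (fun v => if v == 'B' then (1 : Int) else 0) ((grid[i']'hi).toList[j']'hj) := by
    rw [PySem.List.pyGetD_natCast, List.getD_eq_getElem _ _ (by simpa using hj)]
    simp
  rw [houter, hinner]
  unfold pvBit
  simp [List.getElem?_eq_getElem hi, List.getElem?_eq_getElem hj]

-- the central lemma: B's four clamped lookups equal A's 2x2 neighbour sum mod 2
theorem pvTB_eq_pvCell (R : Int) (C : Int) (grid : List String) (hR : 1 ≤ R) (hC : 1 ≤ C)
    (hlen : R ≤ (grid.length : Int)) (hrows : ∀ s ∈ grid.take R.toNat, C ≤ (s.toList.length : Int))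
    (r c : Int) (hr0 : 0 ≤ r) (hr : r < R) (hc0 : 0 ≤ c) (hc : c < C) :
    pvTB R C (pvBuildX R C grid) r c
      = pvCell R C (grid.map (fun row => row.toList.map (fun v => if v == 'B' then (1 : Int) else 0))) r c := by
  unfold pvTB
  have hR0 : (0 : Int) ≤ R := by omega
  have hC0 : (0 : Int) ≤ C := by omega
  have g00 := pvX_get R C grid hR0 hC0 r c hr0 (by omega) hc0 (by omega)
  have g02 := pvX_get R C grid hR0 hC0 r (min (c + 2) C) hr0 (by omega) (by omega) (by omega)
  have g20 := pvX_get R C grid hR0 hC0 (min (r + 2) R) c (by omega) (by omega) hc0 (by omega)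
  have g22 := pvX_get R C grid hR0 hC0 (min (r + 2) R) (min (c + 2) C) (by omega) (by omega) (by omega) (by omega)
  simp only [g00, g02, g20, g22, pv_mod2]
  -- A's side
  unfold pvCell
  have b00 := pv_bread R C grid hlen hrows r c hr0 hr hc0 hc
  have b10 := fun (h : r + 1 < R) => pv_bread R C grid hlen hrows (r + 1) c (by omega) h hc0 hc
  have b01 := fun (h : c + 1 < C) => pv_bread R C grid hlen hrows r (c + 1) hr0 hr (by omega) h
  have b11 := fun (ha : r + 1 < R) (hb : c + 1 < C) =>
    pv_bread R C grid hlen hrows (r + 1) (c + 1) (by omega) ha (by omega) hb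
  -- prefix-sum expansion facts, with Nat abbreviations
  set r' := r.toNat with hr'
  set c' := c.toNat with hc'
  have hrt : (r + 1).toNat = r' + 1 := by omega
  have hct : (c + 1).toNat = c' + 1 := by omega
  have hS1 : ∀ x, pvS grid (r' + 1) x = pvS grid r' x + pvRowS grid r' x := fun _ => rfl
  have hS2 : ∀ x, pvS grid (r' + 2) x = pvS grid (r' + 1) x + pvRowS grid (r' + 1) x := fun _ => rfl
  have hRS1 : ∀ i, pvRowS grid i (c' + 1) = pvRowS grid i c' + pvBit grid i c' := fun _ => rfl
  have hRS2 : ∀ i, pvRowS grid i (c' + 2) = pvRowS grid i (c' + 1) + pvBit grid i (c' + 1) := fun _ => rfl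
  by_cases h1 : r + 1 < R <;> by_cases h2 : c + 1 < C
  · have hm1 : (min (r + 2) R).toNat = r' + 2 := by omega
    have hm2 : (min (c + 2) C).toNat = c' + 2 := by omega
    simp only [if_pos h1, if_pos h2, if_pos (And.intro h1 h2), hm1, hm2, b00, b10 h1, b01 h2,
      b11 h1 h2, pv_mod2, hrt, hct]
    have e1 := hS1 c'; have e2 := hS1 (c' + 2); have e3 := hS2 c'; have e4 := hS2 (c' + 2)
    have e5 := hRS1 r'; have e6 := hRS2 r'; have e7 := hRS1 (r' + 1); have e8 := hRS2 (r' + 1)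
    omega
  · have hm1 : (min (r + 2) R).toNat = r' + 2 := by omega
    have hm2 : (min (c + 2) C).toNat = c' + 1 := by omega
    simp only [if_pos h1, if_neg h2, if_neg (by tauto : ¬(r + 1 < R ∧ c + 1 < C)), hm1, hm2,
      b00, b10 h1, pv_mod2, hrt]
    have e1 := hS1 c'; have e2 := hS1 (c' + 1); have e3 := hS2 c'; have e4 := hS2 (c' + 1)
    have e5 := hRS1 r'; have e7 := hRS1 (r' + 1)
    omega
  · have hm1 : (min (r + 2) R).toNat = r' + 1 := by omega
    have hm2 : (min (c + 2) C).toNat = c' + 2 := by omega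
    simp only [if_neg h1, if_pos h2, if_neg (by tauto : ¬(r + 1 < R ∧ c + 1 < C)), hm1, hm2,
      b00, b01 h2, pv_mod2, hct]
    have e1 := hS1 c'; have e2 := hS1 (c' + 2)
    have e5 := hRS1 r'; have e6 := hRS2 r'
    omega
  · have hm1 : (min (r + 2) R).toNat = r' + 1 := by omega
    have hm2 : (min (c + 2) C).toNat = c' + 1 := by omega
    simp only [if_neg h1, if_neg h2, if_neg (by tauto : ¬(r + 1 < R ∧ c + 1 < C)), hm1, hm2,
      b00, pv_mod2]
    have e1 := hS1 c'; have e2 := hS1 (c' + 1)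
    have e5 := hRS1 r'
    omega

-- proof-only abbreviation: A's read of ngrid[r][c]
def pvG (R : Int) (C : Int) (b : List (List Int)) (r : Int) (c : Int) : Int :=
  PySem.List.pyGetD (PySem.List.pyGetD
    ((PySem.List.pyRange 0 R 1).map (fun r =>
      (PySem.List.pyRange 0 C 1).map (fun c => pvCell R C b r c))) r ([] : List Int)) c 0

theorem pvG_eq (R : Int) (C : Int) (b : List (List Int)) (r c : Int)
    (hr0 : 0 ≤ r) (hrR : r < R) (hc0 : 0 ≤ c) (hcC : c < C) :
    pvG R C b r c = pvCell R C b r c := by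
  unfold pvG
  rw [PySem.List.pyGetD_map_pyRange_of_nonneg _ R r _ hr0 hrR]
  rw [PySem.List.pyGetD_map_pyRange_of_nonneg _ C c _ hc0 hcC]

theorem pv_sum_flatMap {α : Type} (l : List α) (f : α → List Int) :
    (l.flatMap f).sum = (l.map (fun x => (f x).sum)).sum := by
  induction l with
  | nil => simp
  | cons x xs ih => simp [List.flatMap_cons, ih]

-- A's row-by-row total equals a flat total, and two flat totals with pointwise
-- equal in-range terms agree
theorem pv_res_eq (R : Int) (C : Int) (tA tB : Int → Int → Int)
    (heq : ∀ r c, 0 ≤ r → r < R → 0 ≤ c → c < C → tA r c = tB r c) :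
    (((PySem.List.pyRange 0 R 1).map (fun r =>
        (PySem.List.pyRange 0 C 1).map (fun c => tA r c))).map (fun row => row.sum)).sum
      = ((PySem.List.pyRange 0 R 1).flatMap (fun r =>
          (PySem.List.pyRange 0 C 1).map (fun c => tB r c))).sum := by
  rw [pv_sum_flatMap]
  simp only [List.map_map, Function.comp_def]
  refine congrArg _ (List.map_congr_left ?_)
  intro r hrm
  rw [PySem.List.mem_pyRange_one] at hrm
  refine congrArg _ (List.map_congr_left ?_)
  intro c hcm
  rw [PySem.List.mem_pyRange_one] at hcm
  exact heq r c hrm.1 hrm.2 hcm.1 hcm.2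

-- A's triple-equality nested scan equals B's marker-set membership scan,
-- for any two in-range-pointwise-equal transforms
theorem pv_any_eq (R : Int) (C : Int) (hR : 1 ≤ R) (hC : 1 ≤ C) (tA tB : Int → Int → Int)
    (heq : ∀ r c, 0 ≤ r → r < R → 0 ≤ c → c < C → tA r c = tB r c) :
    ((PySem.List.pyRange 0 (R - 1) 1).any (fun r =>
       (PySem.List.pyRange 0 (C - 1) 1).any (fun c =>
         tA r c == tA r (C - 1) && tA r (C - 1) == tA (R - 1) c && tA (R - 1) c == 1)))
  = ((PySem.List.pyRange 0 (R - 1) 1).any (fun r =>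
       ((PySem.List.pyRange 0 (C - 1) 1).filter (fun c => tB r c == 1)).any (fun c =>
         PySem.Set.contains (PySem.Set.ofList
           ((PySem.List.pyRange 0 (R - 1) 1).filter (fun r' =>
             PySem.List.pyGetD ((PySem.List.pyRange 0 R 1).map (fun i => tB i (C - 1))) r' 0 == 1))) r &&
         PySem.Set.contains (PySem.Set.ofList
           ((PySem.List.pyRange 0 (C - 1) 1).filter (fun c' => tB (R - 1) c' == 1))) c))) := by
  have hcol : ∀ x : Int, 0 ≤ x → x < R →
      PySem.List.pyGetD ((PySem.List.pyRange 0 R 1).map (fun i => tB i (C - 1))) x 0 = tB x (C - 1) :=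
    fun x h1 h2 => PySem.List.pyGetD_map_pyRange_of_nonneg _ R x 0 h1 h2
  rw [Bool.eq_iff_iff]
  simp only [List.any_eq_true, List.mem_filter, PySem.Set.contains_iff, PySem.Set.mem_ofList,
    PySem.List.mem_pyRange_one, Bool.and_eq_true, beq_iff_eq]
  constructor
  · intro h
    obtain ⟨r, hr, c, hc, ⟨h1, h2⟩, h3⟩ := h
    have e1 := heq r c (by omega) (by omega) (by omega) (by omega)
    have e2 := heq r (C - 1) (by omega) (by omega) (by omega) (by omega)
    have e3 := heq (R - 1) c (by omega) (by omega) (by omega) (by omega)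
    refine ⟨r, hr, c, ⟨hc, by omega⟩, ⟨hr, ?_⟩, hc, by omega⟩
    rw [hcol r (by omega) (by omega)]
    omega
  · intro h
    obtain ⟨r, hr, c, ⟨hc, h1⟩, ⟨-, h2⟩, -, h3⟩ := h
    rw [hcol r (by omega) (by omega)] at h2
    have e1 := heq r c (by omega) (by omega) (by omega) (by omega)
    have e2 := heq r (C - 1) (by omega) (by omega) (by omega) (by omega)
    have e3 := heq (R - 1) c (by omega) (by omega) (by omega) (by omega)
    exact ⟨r, hr, c, hc, ⟨by omega, by omega⟩, by omega⟩

-- ===== VERDICT (by name: the statement is the Claim_ definition above) =====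
set_option maxHeartbeats 1600000 in
theorem solve_spec : Claim_equal_solve := by
  intro R C grid _hd hpre
  obtain ⟨hR, hC, hlen, hrows⟩ := hpre
  unfold Spec_solve
  have ht : ∀ r c, 0 ≤ r → r < R → 0 ≤ c → c < C →
      pvG R C (grid.map (fun row => row.toList.map (fun v => if v == 'B' then (1 : Int) else 0))) r c
        = pvTB R C (pvBuildX R C grid) r c := by
    intro r c hr0 hr hc0 hc
    rw [pvG_eq R C _ r c hr0 hr hc0 hc, pvTB_eq_pvCell R C grid hR hC hlen hrows r c hr0 hr hc0 hc]
  simp only [solve, solve_alt]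
  revert ht
  generalize (grid.map (fun row => row.toList.map (fun v => if v == 'B' then (1 : Int) else 0))) = b
  generalize pvBuildX R C grid = X
  intro ht
  have hres := pv_res_eq R C
    (fun r c => pvCell R C b r c)
    (fun r c => pvTB R C X r c)
    (fun r c hr0 hr hc0 hc => by
      show pvCell R C b r c = pvTB R C X r c
      rw [← pvG_eq R C b r c hr0 hr hc0 hc]
      exact ht r c hr0 hr hc0 hc)
  have hcorner := ht (R - 1) (C - 1) (by omega) (by omega) (by omega) (by omega)
  have hcol0 : PySem.List.pyGetD ((PySem.List.pyRange 0 R 1).map (fun r => pvTB R C X r (C - 1))) (R - 1) 0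
      = pvTB R C X (R - 1) (C - 1) :=
    PySem.List.pyGetD_map_pyRange_of_nonneg _ R (R - 1) 0 (by omega) (by omega)
  have hany := pv_any_eq R C hR hC (pvG R C b) (pvTB R C X) ht
  simp only [pvG] at hcorner hany
  rw [hres, hany, hcorner, ← hcol0]
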